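-- pv_equiv track=rewrite | github.com/jbm462/ai-text-generator | bigram_ai.py | analyze_pairs
-- ===== SOURCE A (Python) =====
-- def analyze_pairs(text):
--     # Store patterns of character pairs
--     pairs = {}
--
--     # Look through the text, but stop 2 characters before the end
--     for i in range(len(text) - 2):
--         two_chars = text[i:i+2]     # Like 'th' or 'in'
--         next_char = text[i+2]       # What comes after those two
--
--         if two_chars not in pairs:
--             pairs[two_chars] = {}
--
--         if next_char not in pairs[two_chars]:
--             pairs[two_chars][next_char] = 0
--         pairs[two_chars][next_char] += 1
--
--     return pairs
-- ===== SOURCE B (Python) =====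
-- def analyze_pairs(text):
--     # Group-by decomposition: list all trigrams once, then build each bigram's
--     # complete next-char count dict in one go (first-occurrence order preserved).
--     tris = [(text[i:i+2], text[i+2]) for i in range(len(text) - 2)]
--     result = {}
--     for bg in dict.fromkeys(bg for bg, _ in tris):
--         nexts = [nc for b, nc in tris if b == bg]
--         result[bg] = {nc: nexts.count(nc) for nc in dict.fromkeys(nexts)}
--     return result
-- ===== Notes on version B (the rewrite author's own statement) =====
-- stated objective: alternative
-- what changed: B lists all trigrams once, then for each distinct bigram (first-occurrence order via dict.fromkeys) builds its complete next-char count dict in one go by filtering and counting, instead of A's per-trigram incremental mutation of a nested dict.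
import Mathlib
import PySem

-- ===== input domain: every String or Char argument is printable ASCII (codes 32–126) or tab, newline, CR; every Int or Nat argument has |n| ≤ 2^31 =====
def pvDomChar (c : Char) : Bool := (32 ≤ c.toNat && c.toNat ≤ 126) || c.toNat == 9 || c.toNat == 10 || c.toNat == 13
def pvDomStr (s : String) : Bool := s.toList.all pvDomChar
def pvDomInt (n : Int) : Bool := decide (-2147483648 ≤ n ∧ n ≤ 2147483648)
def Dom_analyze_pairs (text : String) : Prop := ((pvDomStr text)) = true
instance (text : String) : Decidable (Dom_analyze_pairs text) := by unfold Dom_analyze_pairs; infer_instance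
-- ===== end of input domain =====

-- B replaces A's incremental nested counting by a group-by decomposition (list all
-- trigrams once, then build each bigram's complete next-char count dict in one go);
-- objective: alternative structure, not speed.

-- shared key extraction: (text[i:i+2], text[i+2]) — i is always in range for both
-- loops, so the `none` branch (Python IndexError) is unreachable.
def pvKey (text : String) (i : Int) : String × String :=
  (PySem.Str.slice text (some i) (some (i + 2)),
   match PySem.Str.pyGet? text (i + 2) with
   | some c => String.ofList [c]
   | none => "")

-- ===== PORT A =====
-- one iteration of A's loop body (the nested dict update, reinsertion = Python's
-- in-place mutation since insert at a present key keeps its position)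
def pvStepA (pairs : PySem.Dict String (PySem.Dict String Int)) (k : String × String) :
    PySem.Dict String (PySem.Dict String Int) :=
  let pairs1 := if pairs.contains k.1 then pairs else pairs.insert k.1 PySem.Dict.empty
  let inner := pairs1.getD k.1 PySem.Dict.empty
  let inner1 := if inner.contains k.2 then inner else inner.insert k.2 0
  pairs1.insert k.1 (inner1.insert k.2 (inner1.getD k.2 0 + 1))

def analyze_pairs (text : String) : List (String × List (String × Int)) :=
  let pairs := (PySem.List.pyRange 0 (PySem.Str.len text - 2) 1).foldl
      (fun pairs i => pvStepA pairs (pvKey text i)) PySem.Dict.empty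
  pairs.items.map (fun p => (p.1, p.2.items))

-- ===== PORT B =====
-- {nc: nexts.count(nc) for nc in dict.fromkeys(nexts)}
def pvCountDict (nexts : List String) : PySem.Dict String Int :=
  (PySem.List.dedup nexts).foldl
    (fun d nc => d.insert nc ((PySem.List.count nexts nc : Int))) PySem.Dict.empty

-- one iteration of B's loop over the distinct bigrams
def pvGroupStep (tris : List (String × String))
    (r : PySem.Dict String (PySem.Dict String Int)) (bg : String) :
    PySem.Dict String (PySem.Dict String Int) :=
  r.insert bg (pvCountDict ((tris.filter (fun t => t.1 == bg)).map (·.2)))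

def analyze_pairs_alt (text : String) : List (String × List (String × Int)) :=
  let tris := (PySem.List.pyRange 0 (PySem.Str.len text - 2) 1).map (pvKey text)
  let result := (PySem.List.dedup (tris.map (·.1))).foldl (pvGroupStep tris) PySem.Dict.empty
  result.items.map (fun p => (p.1, p.2.items))

-- ===== PRECONDITION & SPEC =====
def Spec_analyze_pairs (text : String) (out : List (String × List (String × Int))) : Prop := out = analyze_pairs_alt text
instance (text : String) (out : List (String × List (String × Int))) : Decidable (Spec_analyze_pairs text out) := by unfold Spec_analyze_pairs; infer_instance

-- ===== CLAIM (what is proved, stated in full; the proofs are below) =====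
def Claim_equal_analyze_pairs : Prop := ∀ (text : String), Dom_analyze_pairs text → Spec_analyze_pairs text (analyze_pairs text)

-- ===== LEMMAS AND PROOFS =====

-- proof-side abbreviations
def pvNx (ts : List (String × String)) (bg : String) : List String :=
  (ts.filter (fun t => t.1 == bg)).map (·.2)

def pvA (ts : List (String × String)) : PySem.Dict String (PySem.Dict String Int) :=
  ts.foldl pvStepA PySem.Dict.empty

def pvB (ts : List (String × String)) : PySem.Dict String (PySem.Dict String Int) :=
  (PySem.List.dedup (ts.map (·.1))).foldl (pvGroupStep ts) PySem.Dict.empty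

-- dict.fromkeys(xs ++ [x]): appending one element
lemma pv_dedup_append {α : Type} [BEq α] [LawfulBEq α] (xs : List α) (x : α) :
    PySem.List.dedup (xs ++ [x]) =
      if x ∈ xs then PySem.List.dedup xs else PySem.List.dedup xs ++ [x] := by
  have hm : x ∈ PySem.List.dedup xs ↔ x ∈ xs := PySem.List.mem_dedup xs x
  simp only [PySem.List.dedup, PySem.Set.ofList, PySem.Set.empty] at hm ⊢
  rw [List.foldl_append, List.foldl_cons, List.foldl_nil, PySem.Set.add]
  by_cases h : x ∈ xs
  · simp [hm.2 h, h]
  · simp [h]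
    exact fun hc => h (hm.1 hc)

-- B's inner dict, as its literal items list
lemma pvCountDict_items (xs : List String) :
    (pvCountDict xs).items =
      (PySem.List.dedup xs).map (fun v => (v, (PySem.List.count xs v : Int))) := by
  have h := PySem.Dict.items_foldl_insert_fresh (PySem.List.dedup xs) (fun v => v)
      (fun v => (PySem.List.count xs v : Int)) PySem.Dict.empty
      (fun a _ => PySem.Dict.contains_empty a)
      (by simpa using PySem.List.nodup_dedup xs)
  simpa [pvCountDict] using h

lemma pvCountDict_keys (xs : List String) : (pvCountDict xs).keys = PySem.List.dedup xs := by
  show (pvCountDict xs).items.map (·.1) = _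
  rw [pvCountDict_items, List.map_map]
  simp [Function.comp_def]

lemma pvCountDict_contains (xs : List String) (s : String) :
    (pvCountDict xs).contains s = true ↔ s ∈ xs := by
  rw [PySem.Dict.contains_iff_mem_keys, pvCountDict_keys, PySem.List.mem_dedup]

lemma pvCountDict_getD (xs : List String) {s : String} (h : s ∈ xs) :
    (pvCountDict xs).getD s 0 = (PySem.List.count xs s : Int) := by
  apply PySem.Dict.getD_of_mem_items
  · rw [pvCountDict_items]
    exact List.mem_map.2 ⟨s, (PySem.List.mem_dedup xs s).2 h, rfl⟩
  · rw [pvCountDict_keys]; exact PySem.List.nodup_dedup xs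

-- A's inner update applied to B's finished count dict counts one more occurrence
lemma pvInner_step (xs : List String) (nc : String) :
    (if (pvCountDict xs).contains nc then pvCountDict xs else (pvCountDict xs).insert nc 0).insert nc
      ((if (pvCountDict xs).contains nc then pvCountDict xs
        else (pvCountDict xs).insert nc 0).getD nc 0 + 1) = pvCountDict (xs ++ [nc]) := by
  by_cases h : nc ∈ xs
  · have hc : (pvCountDict xs).contains nc = true := (pvCountDict_contains xs nc).2 h
    rw [if_pos hc, pvCountDict_getD xs h]
    apply PySem.Dict.ext
    rw [PySem.Dict.items_insert_of_contains _ _ hc, pvCountDict_items, pvCountDict_items,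
      pv_dedup_append, if_pos h, List.map_map]
    apply List.map_congr_left
    intro v hv
    by_cases hvnc : v = nc
    · subst hvnc
      simp [PySem.List.count, List.count_append]
    · have hb : (v == nc) = false := by simp [hvnc]
      simp [PySem.List.count, List.count_append, hvnc, Ne.symm hvnc]
  · have hc : (pvCountDict xs).contains nc = false := by
      rw [Bool.eq_false_iff, Ne]
      intro hct; exact h ((pvCountDict_contains xs nc).1 hct)
    rw [if_neg (by simp [hc]), PySem.Dict.getD_insert_self, PySem.Dict.insert_insert_self]
    apply PySem.Dict.ext
    rw [PySem.Dict.items_insert_of_not_contains _ _ hc, pvCountDict_items, pvCountDict_items,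
      pv_dedup_append, if_neg h, List.map_append]
    congr 1
    · apply List.map_congr_left
      intro v hv
      have hvnc : v ≠ nc := fun he => h (he ▸ (PySem.List.mem_dedup xs v).1 hv)
      simp [PySem.List.count, List.count_append, Ne.symm hvnc]
    · have h0 : List.count nc xs = 0 := List.count_eq_zero.2 h
      simp [PySem.List.count, List.count_append, h0]

lemma pvNx_append (ts : List (String × String)) (k : String × String) (b : String) :
    pvNx (ts ++ [k]) b = pvNx ts b ++ (if k.1 == b then [k.2] else []) := by
  simp only [pvNx, List.filter_append, List.map_append, List.filter_cons, List.filter_nil]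
  by_cases h : (k.1 == b) = true
  · simp [h]
  · simp [h]

-- B's outer dict, as its literal items list
lemma pvB_items (ts : List (String × String)) :
    (pvB ts).items =
      (PySem.List.dedup (ts.map (·.1))).map (fun b => (b, pvCountDict (pvNx ts b))) := by
  have h := PySem.Dict.items_foldl_insert_fresh (PySem.List.dedup (ts.map (·.1))) (fun b => b)
      (fun b => pvCountDict (pvNx ts b)) PySem.Dict.empty
      (fun a _ => PySem.Dict.contains_empty a)
      (by simpa using PySem.List.nodup_dedup (ts.map (·.1)))
  simpa [pvB, pvGroupStep, pvNx] using h

lemma pvB_keys (ts : List (String × String)) : (pvB ts).keys = PySem.List.dedup (ts.map (·.1)) := by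
  show (pvB ts).items.map (·.1) = _
  rw [pvB_items, List.map_map]
  simp [Function.comp_def]

lemma pvB_contains (ts : List (String × String)) (b : String) :
    (pvB ts).contains b = true ↔ b ∈ ts.map (·.1) := by
  rw [PySem.Dict.contains_iff_mem_keys, pvB_keys, PySem.List.mem_dedup]

lemma pvB_getD (ts : List (String × String)) {b : String} (h : b ∈ ts.map (·.1)) :
    (pvB ts).getD b PySem.Dict.empty = pvCountDict (pvNx ts b) := by
  apply PySem.Dict.getD_of_mem_items
  · rw [pvB_items]
    exact List.mem_map.2 ⟨b, (PySem.List.mem_dedup _ b).2 h, rfl⟩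
  · rw [pvB_keys]; exact PySem.List.nodup_dedup _

-- the crux: one step of A's loop advances B's group-by result by one trigram
lemma pvB_step (ts : List (String × String)) (k : String × String) :
    pvB (ts ++ [k]) = pvStepA (pvB ts) k := by
  have hmap : (ts ++ [k]).map (·.1) = ts.map (·.1) ++ [k.1] := by simp
  by_cases hk : k.1 ∈ ts.map (·.1)
  · have hc : (pvB ts).contains k.1 = true := (pvB_contains ts k.1).2 hk
    simp only [pvStepA, hc, if_true, pvB_getD ts hk]
    rw [pvInner_step]
    have hnx : pvNx ts k.1 ++ [k.2] = pvNx (ts ++ [k]) k.1 := by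
      rw [pvNx_append]; simp
    rw [hnx]
    apply PySem.Dict.ext
    rw [PySem.Dict.items_insert_of_contains _ _ hc, pvB_items, pvB_items, hmap,
      pv_dedup_append, if_pos hk, List.map_map]
    apply List.map_congr_left
    intro b hb
    by_cases hbk : b = k.1
    · subst hbk; simp
    · have hbne : (b == k.1) = false := by simp [hbk]
      have hkb : (k.1 == b) = false := beq_eq_false_iff_ne.2 (fun he => hbk (Eq.symm he))
      simp [pvNx_append, hkb, hbk]
  · have hc : (pvB ts).contains k.1 = false := by
      rw [Bool.eq_false_iff, Ne]
      intro hct; exact hk ((pvB_contains ts k.1).1 hct)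
    simp only [pvStepA, hc, Bool.false_eq_true, if_false, PySem.Dict.getD_insert_self,
      PySem.Dict.contains_empty, PySem.Dict.insert_insert_self]
    norm_num
    apply PySem.Dict.ext
    rw [PySem.Dict.items_insert_of_not_contains _ _ hc, pvB_items, pvB_items, hmap,
      pv_dedup_append, if_neg hk, List.map_append]
    congr 1
    · apply List.map_congr_left
      intro b hb
      have hbmem : b ∈ ts.map (·.1) := (PySem.List.mem_dedup _ b).1 hb
      have hkb : (k.1 == b) = false := by
        simp only [beq_eq_false_iff_ne, Ne]
        intro he; exact hk (he ▸ hbmem)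
      simp [pvNx_append, hkb]
    · have h0 : pvNx ts k.1 = [] := by
        simp only [pvNx, List.map_eq_nil_iff, List.filter_eq_nil_iff]
        intro t ht
        simp only [beq_eq_false_iff_ne, Ne, Bool.not_eq_true, beq_eq_false_iff_ne]
        intro he; exact hk (List.mem_map.2 ⟨t, ht, he⟩)
      have hnx : pvNx (ts ++ [k]) k.1 = [k.2] := by
        rw [pvNx_append, h0]; simp
      simp only [List.map_cons, List.map_nil]
      rw [hnx]
      simp [pvCountDict, PySem.List.dedup, PySem.Set.ofList, PySem.Set.add, PySem.Set.empty,
        PySem.List.count]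

lemma pvB_eq_pvA (ts : List (String × String)) : pvB ts = pvA ts := by
  induction ts using List.reverseRecOn with
  | nil => rfl
  | append_singleton ts k ih =>
      rw [pvB_step, ih]
      simp [pvA, List.foldl_append]

-- ===== VERDICT (by name: the statement is the Claim_ definition above) =====
theorem analyze_pairs_spec : Claim_equal_analyze_pairs := by
  intro text _
  unfold Spec_analyze_pairs analyze_pairs analyze_pairs_alt
  have h := pvB_eq_pvA ((PySem.List.pyRange 0 (PySem.Str.len text - 2) 1).map (pvKey text))
  simp only [pvB, pvA, List.foldl_map] at h
  rw [← h]
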